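-- pv_equiv track=rewrite | github.com/danieljtait/pydygp | pydygp/linlatentforcemodels/mlfmsamoe2.py | _var_mixer
-- ===== SOURCE A (Python) =====
-- def _unpack_vector(x, shape):
--     res = []
--     ntot = 0
--     for n in shape:
--         res.append(x[ntot:ntot+n])
--         ntot += n
--     return res
--
-- def _var_mixer(free_vars, free_vars_shape, fixed_vars, is_fixed_vars):
--     """
--     Utility function to mix the free vars and the fixed vars
--     """
--     free_vars = _unpack_vector(free_vars, free_vars_shape)
--     if is_fixed_vars is None:
--         return free_vars
--     else:
--         full_vars = []
--         ifree, ifixed = (0, 0)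
--         for b in is_fixed_vars:
--             if b:
--                 full_vars.append(fixed_vars[ifixed])
--                 ifixed += 1
--             else:
--                 full_vars.append(free_vars[ifree])
--                 ifree += 1
--         return full_vars
-- ===== SOURCE B (Python) =====
-- def _var_mixer(free_vars, free_vars_shape, fixed_vars, is_fixed_vars):
--     """
--     Utility function to mix the free vars and the fixed vars
--     """
--     if is_fixed_vars is None:
--         flags = [False] * len(free_vars_shape)
--     else:
--         flags = is_fixed_vars
--     shapes = iter(free_vars_shape)
--     fixeds = iter(fixed_vars)
--     out = []
--     off = 0
--     for b in flags:
--         if b: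
--             out.append(next(fixeds))
--         else:
--             n = next(shapes)
--             out.append(free_vars[off:off + n])
--             off += n
--     return out
-- ===== Notes on version B (the rewrite author's own statement) =====
-- stated objective: alternative
-- what changed: B is a single fused pass: it folds the None case into the mixing loop via an all-False flag list and consumes iterators over free_vars_shape and fixed_vars while slicing free_vars at a running offset, so A's separate unpacking pass and its intermediate list of slices disappear entirely.
import Mathlib
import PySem

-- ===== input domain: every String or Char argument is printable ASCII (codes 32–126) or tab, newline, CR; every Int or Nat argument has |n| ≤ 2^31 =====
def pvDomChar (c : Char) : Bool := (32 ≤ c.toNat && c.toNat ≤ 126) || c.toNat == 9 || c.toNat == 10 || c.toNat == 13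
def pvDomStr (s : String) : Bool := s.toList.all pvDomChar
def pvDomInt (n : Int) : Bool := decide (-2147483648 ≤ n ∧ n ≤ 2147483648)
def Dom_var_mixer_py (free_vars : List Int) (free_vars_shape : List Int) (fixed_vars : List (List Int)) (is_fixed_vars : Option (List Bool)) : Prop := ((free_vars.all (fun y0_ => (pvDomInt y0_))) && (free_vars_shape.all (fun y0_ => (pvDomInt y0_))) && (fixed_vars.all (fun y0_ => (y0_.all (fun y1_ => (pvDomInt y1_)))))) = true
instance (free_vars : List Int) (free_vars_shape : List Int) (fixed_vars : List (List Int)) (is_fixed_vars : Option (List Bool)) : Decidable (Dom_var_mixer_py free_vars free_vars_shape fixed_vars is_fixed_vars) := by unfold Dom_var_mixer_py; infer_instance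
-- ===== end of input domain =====

-- ===== PORT A =====
-- B replaces A's two stages (precompute all slices, then mix by index) with one fused loop
-- over a flag list consuming iterators; alternative decomposition, same cost.
-- helper: A's _unpack_vector loop (structural recursion over shape, running ntot)
def pvUnpackA (x : List Int) (ntot : Int) : List Int → List (List Int)
  | [] => []
  | n :: rest => PySem.List.slice x (some ntot) (some (ntot + n)) :: pvUnpackA x (ntot + n) rest

-- A's mixing loop; ifree/ifixed are the nonnegative counters; Python's lst[i] at a
-- nonnegative in-range index is lst[i]?; out-of-range (Python IndexError) is excluded by Pre_.
def pvMixA (fv fixed : List (List Int)) : List Bool → Nat → Nat → List (List Int)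
  | [], _, _ => []
  | b :: bs, ifree, ifixed =>
    if b then (fixed[ifixed]?.getD []) :: pvMixA fv fixed bs ifree (ifixed + 1)
    else (fv[ifree]?.getD []) :: pvMixA fv fixed bs (ifree + 1) ifixed

def var_mixer_py (free_vars : List Int) (free_vars_shape : List Int) (fixed_vars : List (List Int)) (is_fixed_vars : Option (List Bool)) : List (List Int) :=
  let fv := pvUnpackA free_vars 0 free_vars_shape
  match is_fixed_vars with
  | none => fv
  | some bs => pvMixA fv fixed_vars bs 0 0

-- ===== PORT B =====
-- B's single fused loop over the flag list; the two Python iterators are the list suffixes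
-- `shapes`/`fixeds` consumed head-first (next() = headD + drop; exhaustion, Python's
-- StopIteration, is excluded by Pre_), with the running slice offset `off`.
def pvMixB (free : List Int) : List Bool → List Int → List (List Int) → Int → List (List Int)
  | [], _, _, _ => []
  | b :: bs, shapes, fixeds, off =>
    if b then fixeds.headD [] :: pvMixB free bs shapes (fixeds.drop 1) off
    else
      PySem.List.slice free (some off) (some (off + shapes.headD 0)) ::
        pvMixB free bs (shapes.drop 1) fixeds (off + shapes.headD 0)

def var_mixer_py_alt (free_vars : List Int) (free_vars_shape : List Int) (fixed_vars : List (List Int)) (is_fixed_vars : Option (List Bool)) : List (List Int) :=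
  let flags := match is_fixed_vars with
    | none => List.replicate free_vars_shape.length false
    | some bs => bs
  pvMixB free_vars flags free_vars_shape fixed_vars 0

-- ===== PRECONDITION & SPEC =====
-- Pre_ excludes exactly the inputs where A raises IndexError: more False entries in
-- is_fixed_vars than shapes (free_vars[ifree] out of range) or more True entries than fixed_vars.
def Pre_var_mixer_py (free_vars : List Int) (free_vars_shape : List Int) (fixed_vars : List (List Int)) (is_fixed_vars : Option (List Bool)) : Prop :=
  match is_fixed_vars with
  | none => True
  | some bs => bs.count false ≤ free_vars_shape.length ∧ bs.count true ≤ fixed_vars.length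
instance (free_vars : List Int) (free_vars_shape : List Int) (fixed_vars : List (List Int)) (is_fixed_vars : Option (List Bool)) : Decidable (Pre_var_mixer_py free_vars free_vars_shape fixed_vars is_fixed_vars) := by unfold Pre_var_mixer_py; cases is_fixed_vars <;> infer_instance

def pvWitness_var_mixer_py : List Int × List Int × List (List Int) × Option (List Bool) :=
  ([1, 2, 3], [2, 1], [[7]], some [true, false, false])

def Spec_var_mixer_py (free_vars : List Int) (free_vars_shape : List Int) (fixed_vars : List (List Int)) (is_fixed_vars : Option (List Bool)) (out : List (List Int)) : Prop := out = var_mixer_py_alt free_vars free_vars_shape fixed_vars is_fixed_vars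
instance (free_vars : List Int) (free_vars_shape : List Int) (fixed_vars : List (List Int)) (is_fixed_vars : Option (List Bool)) (out : List (List Int)) : Decidable (Spec_var_mixer_py free_vars free_vars_shape fixed_vars is_fixed_vars out) := by unfold Spec_var_mixer_py; infer_instance

-- ===== CLAIM =====
def Claim_equal_var_mixer_py : Prop := ∀ (free_vars : List Int) (free_vars_shape : List Int) (fixed_vars : List (List Int)) (is_fixed_vars : Option (List Bool)), Dom_var_mixer_py free_vars free_vars_shape fixed_vars is_fixed_vars → Pre_var_mixer_py free_vars free_vars_shape fixed_vars is_fixed_vars → Spec_var_mixer_py free_vars free_vars_shape fixed_vars is_fixed_vars (var_mixer_py free_vars free_vars_shape fixed_vars is_fixed_vars)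

-- ===== LEMMAS AND PROOFS =====

-- (l.drop n).headD d is Python's l[n] with a default
theorem drop_headD {α : Type} (l : List α) (n : Nat) (d : α) :
    (l.drop n).headD d = l[n]?.getD d := by
  induction l generalizing n with
  | nil => simp
  | cons a t ih =>
    cases n with
    | zero => simp
    | succ n => simpa using ih n

-- A's None-branch (the unpacked list) equals B's loop on an all-False flag list
theorem pvUnpack_eq_mixB (x : List Int) (fx : List (List Int)) (shape : List Int) (t : Int) :
    pvUnpackA x t shape = pvMixB x (List.replicate shape.length false) shape fx t := by
  induction shape generalizing t with
  | nil => rfl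
  | cons n rest ih => simp [pvUnpackA, pvMixB, List.replicate_succ, ih]

-- the k-th element of the unpacked list is the on-the-fly slice at the accumulated offset
theorem pvUnpackA_get (x : List Int) (shape : List Int) (ntot : Int) (k : Nat)
    (hk : k < shape.length) :
    (pvUnpackA x ntot shape)[k]?.getD [] =
      PySem.List.slice x (some (ntot + (shape.take k).sum))
        (some (ntot + (shape.take k).sum + shape[k]?.getD 0)) := by
  induction shape generalizing ntot k with
  | nil => simp at hk
  | cons n rest ih =>
    cases k with
    | zero => simp [pvUnpackA]
    | succ k =>
      have hk' : k < rest.length := by simpa using hk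
      have := ih (ntot + n) k hk'
      simp only [pvUnpackA, List.getElem?_cons_succ, List.take_succ_cons, List.sum_cons]
      rw [this]
      ring_nf

-- loop invariant: A's index-based mix over the precomputed slices equals B's fused loop
-- whose iterator state is the suffixes shape.drop ifree / fixed.drop ifixed
theorem pvMix_eq (free : List Int) (shape : List Int) (fixed : List (List Int))
    (bs : List Bool) (ifree ifixed : Nat)
    (h : bs.count false + ifree ≤ shape.length) :
    pvMixA (pvUnpackA free 0 shape) fixed bs ifree ifixed =
      pvMixB free bs (shape.drop ifree) (fixed.drop ifixed) ((shape.take ifree).sum) := by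
  induction bs generalizing ifree ifixed with
  | nil => rfl
  | cons b bs ih =>
    cases b with
    | true =>
      have h' : bs.count false + ifree ≤ shape.length := by
        simpa [List.count_cons] using h
      simp [pvMixA, pvMixB, ih ifree (ifixed + 1) h', drop_headD, List.drop_drop]
    | false =>
      have hlt : ifree < shape.length := by
        simp at h; omega
      have h' : bs.count false + (ifree + 1) ≤ shape.length := by
        simp at h; omega
      have hsum : (shape.take (ifree + 1)).sum =
          (shape.take ifree).sum + shape[ifree]?.getD 0 := by
        have hg : shape[ifree]? = some shape[ifree] := List.getElem?_eq_getElem hlt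
        rw [List.sum_take_succ _ _ hlt, hg]
        rfl
      simp only [pvMixA, pvMixB, Bool.false_eq_true, if_false]
      rw [pvUnpackA_get free shape 0 ifree hlt, ih (ifree + 1) ifixed h',
        drop_headD, hsum, List.drop_drop]
      norm_num

-- ===== VERDICT =====
theorem var_mixer_py_spec : Claim_equal_var_mixer_py := by
  intro free shape fixed ifv _ hpre
  unfold Spec_var_mixer_py var_mixer_py var_mixer_py_alt
  cases ifv with
  | none => simpa using pvUnpack_eq_mixB free fixed shape 0
  | some bs =>
    have h : bs.count false + 0 ≤ shape.length := by
      simpa using hpre.1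
    simpa using pvMix_eq free shape fixed bs 0 0 h
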